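-- pv_equiv track=rewrite | github.com/SMJin/JJ-Algorithm-Study | patt(jung)/sst/week_10/마법사_상어와_블리자드_boj_21611/마법사_상어와_블리자드_boj_21611.py | get_step1
-- ===== SOURCE A (Python) =====
-- def get_step1(a, d, s):
--     if d == 1:
--         x = 7
--     elif d == 2:
--         x = 3
--     elif d == 3:
--         x = 1
--     else:
--         x = 5
--     removes = [x]
--     for i in range(1, s):
--         removes.append(removes[-1] + x + 8 * i)
--
--     remove_idx = 0
--     ret = []
--     for i in range(len(a)):
--         if remove_idx < len(removes) and i == removes[remove_idx]:
--             remove_idx += 1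
--             continue
--         ret.append(a[i])
--
--     return ret
-- ===== SOURCE B (Python) =====
-- def get_step1(a, d, s):
--     x = {1: 7, 2: 3, 3: 1}.get(d, 5)
--     removes = [(k + 1) * (x + 4 * k) for k in range(max(1, s))]
--     parts = []
--     start = 0
--     for r in removes:
--         parts.append(a[start:r])
--         start = r + 1
--     parts.append(a[start:])
--     return [v for p in parts for v in p]
-- ===== Notes on version B (the rewrite author's own statement) =====
-- stated objective: alternative
-- what changed: B computes the removed spiral positions by the closed form (k+1)*(x+4k) instead of A's running accumulator and builds the output by slicing the gaps between removed positions instead of A's element-by-element pointer scan.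
import Mathlib
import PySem

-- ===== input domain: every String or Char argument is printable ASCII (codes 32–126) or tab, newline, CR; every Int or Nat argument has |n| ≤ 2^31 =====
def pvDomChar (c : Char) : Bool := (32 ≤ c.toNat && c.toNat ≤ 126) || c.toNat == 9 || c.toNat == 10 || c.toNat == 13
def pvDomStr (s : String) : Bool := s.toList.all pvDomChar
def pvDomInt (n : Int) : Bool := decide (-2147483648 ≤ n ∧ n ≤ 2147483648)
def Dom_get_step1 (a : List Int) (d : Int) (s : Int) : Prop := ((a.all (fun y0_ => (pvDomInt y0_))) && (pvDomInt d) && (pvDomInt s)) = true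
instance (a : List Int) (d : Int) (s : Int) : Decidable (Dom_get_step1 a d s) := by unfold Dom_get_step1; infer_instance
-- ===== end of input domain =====

-- B replaces A's running-accumulator removes list and element-by-element pointer scan by a
-- closed-form removes list and gap slicing between the removed positions (objective: alternative).

-- ===== PORT A =====
def get_step1 (a : List Int) (d : Int) (s : Int) : List Int :=
  let x : Int := if d = 1 then 7 else if d = 2 then 3 else if d = 3 then 1 else 5
  -- the appending loop is transcribed with a cons accumulator (reversed) for linear cost;
  -- removes[-1] (O(1) in Python) is the head of the reversed accumulator, always nonempty
  let removes : List Int :=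
    ((PySem.List.pyRange 1 s 1).foldl
      (fun rs i => (rs.headD 0 + x + 8 * i) :: rs) [x]).reverse
  -- len(removes) is O(1) in Python; computed once here
  let rcount : Int := (removes.length : Int)
  let st : Int × List Int :=
    (PySem.List.pyRange 0 (PySem.List.len a) 1).foldl
      (fun (st : Int × List Int) i =>
        if st.1 < rcount ∧ i = PySem.List.pyGetD removes st.1 0
        then (st.1 + 1, st.2)
        else (st.1, st.2 ++ [PySem.List.pyGetD a i 0]))
      (0, [])
  st.2

-- ===== PORT B =====
def get_step1_alt (a : List Int) (d : Int) (s : Int) : List Int :=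
  let x : Int := PySem.Dict.getD (PySem.Dict.ofList [((1:Int), (7:Int)), (2, 3), (3, 1)]) d 5
  let removes : List Int :=
    (PySem.List.pyRange 0 (max 1 s) 1).map (fun k => (k + 1) * (x + 4 * k))
  -- parts is accumulated reversed (cons) for linear cost and reversed at the end
  let st : Int × List (List Int) :=
    removes.foldl
      (fun (st : Int × List (List Int)) r =>
        (r + 1, PySem.List.slice a (some st.1) (some r) :: st.2))
      (0, [])
  (st.2.reverse ++ [PySem.List.slice a (some st.1) none]).flatten

-- ===== PRECONDITION & SPEC =====
def Spec_get_step1 (a : List Int) (d : Int) (s : Int) (out : List Int) : Prop := out = get_step1_alt a d s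
instance (a : List Int) (d : Int) (s : Int) (out : List Int) : Decidable (Spec_get_step1 a d s out) := by unfold Spec_get_step1; infer_instance

-- ===== CLAIM (what is proved, stated in full; the proofs are below) =====
def Claim_equal_get_step1 : Prop := ∀ (a : List Int) (d : Int) (s : Int), Dom_get_step1 a d s → Spec_get_step1 a d s (get_step1 a d s)

-- ===== LEMMAS AND PROOFS =====

-- B's x (dict lookup) equals A's x (if-chain)
lemma x_eq (d : Int) :
    PySem.Dict.getD (PySem.Dict.ofList [((1:Int), (7:Int)), (2, 3), (3, 1)]) d 5
      = (if d = 1 then 7 else if d = 2 then 3 else if d = 3 then 1 else 5) := by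
  have h : PySem.Dict.ofList [((1:Int), (7:Int)), (2, 3), (3, 1)]
      = ((PySem.Dict.empty.insert 1 7).insert 2 3).insert 3 1 := by rfl
  rw [h]
  simp only [PySem.Dict.getD_insert]
  by_cases h1 : d = 1 <;> by_cases h2 : d = 2 <;> by_cases h3 : d = 3 <;>
    simp [h1, h2, h3, PySem.Dict.getD, PySem.Dict.get?, PySem.Dict.empty]

lemma removes_eq_aux (x : Int) : ∀ (n : Nat),
    (PySem.List.pyRange 1 ((n:Int) + 1) 1).foldl
        (fun rs i => (rs.headD 0 + x + 8 * i) :: rs) [x]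
      = ((PySem.List.pyRange 0 ((n:Int) + 1) 1).map (fun k => (k + 1) * (x + 4 * k))).reverse := by
  intro n
  induction n with
  | zero =>
    rw [PySem.List.pyRange_one_eq_nil (by norm_num)]
    rw [show (((0:Nat):Int) + 1) = 0 + 1 by norm_num, PySem.List.pyRange_one_singleton]
    norm_num
  | succ n ih =>
    have hrev : (((PySem.List.pyRange 0 ((n:Int) + 1) 1).map
          (fun k => (k + 1) * (x + 4 * k))).reverse)
        = ((n:Int) + 1) * (x + 4 * (n:Int))
            :: ((PySem.List.pyRange 0 ((n:Int)) 1).map (fun k => (k + 1) * (x + 4 * k))).reverse := by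
      rw [PySem.List.pyRange_one_succ_right (by omega), List.map_append, List.reverse_append]
      simp
    rw [show (((n+1:Nat):Int) + 1) = ((n:Int) + 1) + 1 by push_cast; ring]
    rw [PySem.List.pyRange_one_succ_right (by omega), List.foldl_append, ih,
      List.foldl_cons, List.foldl_nil, hrev, List.headD_cons]
    conv_rhs => rw [PySem.List.pyRange_one_succ_right (a := 0) (by omega), List.map_append,
      List.reverse_append]
    rw [← hrev]
    simp only [List.map_cons, List.map_nil, List.reverse_cons, List.reverse_nil,
      List.nil_append, List.singleton_append, List.cons.injEq, and_true]
    ring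

-- A's removes accumulator (reversed) in closed form (B's removes comprehension)
lemma removes_eq (x s : Int) :
    ((PySem.List.pyRange 1 s 1).foldl
        (fun rs i => (rs.headD 0 + x + 8 * i) :: rs) [x]).reverse
      = (PySem.List.pyRange 0 (max 1 s) 1).map (fun k => (k + 1) * (x + 4 * k)) := by
  by_cases hs : s ≤ 1
  · rw [max_eq_left (by omega), PySem.List.pyRange_one_eq_nil (by omega),
      show PySem.List.pyRange 0 1 1 = [0] from by decide]
    norm_num
  · rw [max_eq_right (by omega), show s = (((s-1).toNat : Nat) : Int) + 1 by omega,
      removes_eq_aux x _, List.reverse_reverse]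

-- gap decomposition of the output: elements of a at indices ≥ start that are not in rs
def gaps (a : List Int) (rs : List Int) (start : Int) : List Int :=
  match rs with
  | [] => PySem.List.slice a (some start) none
  | r :: rs => PySem.List.slice a (some start) (some r) ++ gaps a rs (r + 1)

lemma gaps_empty (a : List Int) (rs : List Int) (start : Int)
    (h0 : (PySem.List.len a) ≤ start) (hs : 0 ≤ start)
    (hge : ∀ r ∈ rs, start ≤ r) (hp : rs.Pairwise (· < ·)) :
    gaps a rs start = [] := by
  induction rs generalizing start with
  | nil =>
    simp only [gaps]
    rw [PySem.List.slice_from a hs]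
    apply List.drop_eq_nil_of_le
    simp [PySem.List.len] at h0
    omega
  | cons r rs ih =>
    simp only [gaps]
    have hr : start ≤ r := hge r (by simp)
    rw [PySem.List.slice_toNat a hs (by omega)]
    have h1 : (a.drop start.toNat) = [] := by
      apply List.drop_eq_nil_of_le
      simp [PySem.List.len] at h0
      omega
    rw [h1, List.take_nil, List.nil_append]
    exact ih (r + 1) (by omega) (by omega)
      (fun r' hr' => by have := (List.pairwise_cons.mp hp).1 r' hr'; omega)
      (List.pairwise_cons.mp hp).2

-- B's fold computes the gap decomposition
lemma foldB_eq (a : List Int) (rs : List Int) (start : Int) (parts : List (List Int)) :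
    (let st := rs.foldl
        (fun (st : Int × List (List Int)) r =>
          (r + 1, PySem.List.slice a (some st.1) (some r) :: st.2))
        (start, parts)
     (st.2.reverse ++ [PySem.List.slice a (some st.1) none]).flatten)
      = parts.reverse.flatten ++ gaps a rs start := by
  induction rs generalizing start parts with
  | nil => simp [gaps]
  | cons r rs ih =>
    simp only [List.foldl_cons]
    rw [ih]
    simp [gaps]

lemma gaps_cons_elem (a : List Int) (rs : List Int) (i : Int)
    (h0 : 0 ≤ i) (hia : i < PySem.List.len a) (hlt : ∀ r ∈ rs, i < r) :
    gaps a rs i = PySem.List.pyGetD a i 0 :: gaps a rs (i + 1) := by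
  have hlen : i.toNat < a.length := by simp [PySem.List.len] at hia; omega
  have hdrop : a.drop i.toNat = a[i.toNat] :: a.drop (i.toNat + 1) :=
    List.drop_eq_getElem_cons hlen
  have hget : PySem.List.pyGetD a i 0 = a[i.toNat] :=
    PySem.List.pyGetD_eq_getElem a 0 h0 (by simpa [PySem.List.len] using hia)
  have ht : (i + 1).toNat = i.toNat + 1 := by omega
  cases rs with
  | nil =>
    simp only [gaps]
    rw [PySem.List.slice_from a h0, PySem.List.slice_from a (by omega), hdrop, hget, ht]
  | cons r rs' =>
    have hir : i < r := hlt r (by simp)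
    simp only [gaps]
    rw [PySem.List.slice_toNat a h0 (by omega), PySem.List.slice_toNat a (by omega) (by omega),
      hdrop, hget, ht]
    have : r.toNat - i.toNat = (r.toNat - (i.toNat + 1)) + 1 := by omega
    rw [this, List.take_succ_cons]
    simp

-- A's pointer scan computes the gap decomposition
lemma scanA_eq (a rs : List Int) (hp : rs.Pairwise (· < ·)) :
    ∀ (k : Nat) (i : Int) (ridx : Nat) (acc : List Int),
      (PySem.List.len a - i).toNat = k → 0 ≤ i →
      (∀ r ∈ rs.drop ridx, i ≤ r) →
      ((PySem.List.pyRange i (PySem.List.len a) 1).foldl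
         (fun (st : Int × List Int) j =>
           if st.1 < (rs.length : Int) ∧ j = PySem.List.pyGetD rs st.1 0
           then (st.1 + 1, st.2)
           else (st.1, st.2 ++ [PySem.List.pyGetD a j 0]))
         ((ridx : Int), acc)).2
        = acc ++ gaps a (rs.drop ridx) i := by
  intro k
  induction k with
  | zero =>
    intro i ridx acc hk h0 hge
    have hle : PySem.List.len a ≤ i := by omega
    rw [PySem.List.pyRange_one_eq_nil hle, List.foldl_nil]
    rw [gaps_empty a _ i hle h0 hge (hp.sublist (List.drop_sublist _ _))]
    simp
  | succ k ih =>
    intro i ridx acc hk h0 hge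
    have hia : i < PySem.List.len a := by omega
    rw [PySem.List.pyRange_one_cons hia, List.foldl_cons]
    have hpd : (rs.drop ridx).Pairwise (· < ·) := hp.sublist (List.drop_sublist _ _)
    cases hd : rs.drop ridx with
    | nil =>
      have hlen : rs.length ≤ ridx := List.drop_eq_nil_iff.mp hd
      rw [if_neg (by rintro ⟨h1, -⟩; have h1' : (ridx : Int) < (rs.length : Int) := h1; omega)]
      have := ih (i + 1) ridx (acc ++ [PySem.List.pyGetD a i 0]) (by omega) (by omega)
        (by rw [hd]; simp)
      simp only [this, hd]
      rw [gaps_cons_elem a [] i h0 hia (by simp)]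
      simp
    | cons r rest =>
      have hridx : ridx < rs.length := by
        by_contra hc
        rw [List.drop_eq_nil_iff.mpr (by omega)] at hd
        simp at hd
      have hget : PySem.List.pyGetD rs (ridx : Int) 0 = r := by
        have h1 : rs[ridx]? = some r := by
          have h2 := congrArg (fun l => l[0]?) hd
          simpa [List.getElem?_drop] using h2
        rw [PySem.List.pyGetD_natCast, List.getD_eq_getElem?_getD, h1]
        rfl
      have hplist : (r :: rest).Pairwise (· < ·) := hd ▸ hpd
      have hdrop1 : rs.drop (ridx + 1) = rest := by
        rw [← List.tail_drop, hd]
        rfl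
      by_cases hir : i = r
      · rw [if_pos ⟨(by exact_mod_cast hridx : (ridx : Int) < (rs.length : Int)),
          (by rw [hget, hir] : i = PySem.List.pyGetD rs (ridx : Int) 0)⟩]
        have hcast : ((ridx : Int) + 1) = ((ridx + 1 : Nat) : Int) := by push_cast; ring
        rw [hcast]
        have := ih (i + 1) (ridx + 1) acc (by omega) (by omega)
          (by rw [hdrop1]; intro r' hr'
              have := (List.pairwise_cons.mp hplist).1 r' hr'
              omega)
        simp only [this, hdrop1]
        simp only [gaps]
        rw [PySem.List.slice_toNat a h0 (by omega)]
        rw [show r.toNat - i.toNat = 0 by omega]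
        simp [hir]
      · have hir' : i < r := lt_of_le_of_ne (hge r (by rw [hd]; simp)) hir
        rw [if_neg (by rintro ⟨-, h2⟩; exact hir (h2.trans hget))]
        have := ih (i + 1) ridx (acc ++ [PySem.List.pyGetD a i 0]) (by omega) (by omega)
          (by rw [hd]; intro r' hr'
              rcases List.mem_cons.mp hr' with h | h
              · omega
              · have := (List.pairwise_cons.mp hplist).1 r' h; omega)
        simp only [this, hd]
        rw [gaps_cons_elem a (r :: rest) i h0 hia
          (by intro r' hr'
              rcases List.mem_cons.mp hr' with h | h
              · omega
              · have := (List.pairwise_cons.mp hplist).1 r' h; omega)]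
        simp

-- B's removes list is strictly increasing and nonnegative (x ≥ 1)
lemma remB_pairwise (x m : Int) (hx : 1 ≤ x) :
    ((PySem.List.pyRange 0 m 1).map (fun k => (k + 1) * (x + 4 * k))).Pairwise (· < ·) := by
  rw [List.pairwise_map]
  apply List.Pairwise.imp_of_mem ?_ (PySem.List.pairwise_lt_pyRange_one 0 m)
  intro k k' hk hk' hlt
  have h1 : 0 ≤ k := (PySem.List.mem_pyRange_one.mp hk).1
  have h2 : 0 ≤ k' := (PySem.List.mem_pyRange_one.mp hk').1
  nlinarith

lemma remB_nonneg (x m : Int) (hx : 1 ≤ x) :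
    ∀ r ∈ (PySem.List.pyRange 0 m 1).map (fun k => (k + 1) * (x + 4 * k)), 0 ≤ r := by
  intro r hr
  rcases List.mem_map.mp hr with ⟨k, hk, rfl⟩
  have h1 : 0 ≤ k := (PySem.List.mem_pyRange_one.mp hk).1
  nlinarith

-- ===== VERDICT (by name: the statement is the Claim_ definition above) =====
theorem get_step1_spec : Claim_equal_get_step1 := by
  intro a d s _
  show get_step1 a d s = get_step1_alt a d s
  simp only [get_step1, get_step1_alt, x_eq d, removes_eq]
  set x : Int := if d = 1 then 7 else if d = 2 then 3 else if d = 3 then 1 else 5 with hxdef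
  have hx : 1 ≤ x := by rw [hxdef]; split_ifs <;> norm_num
  set rsB : List Int :=
    (PySem.List.pyRange 0 (max 1 s) 1).map (fun k => (k + 1) * (x + 4 * k)) with hrsB
  rw [foldB_eq a rsB 0 []]
  simp only [List.reverse_nil, List.flatten_nil, List.nil_append]
  have h := scanA_eq a rsB (by rw [hrsB]; exact remB_pairwise x _ hx)
    (PySem.List.len a - 0).toNat 0 0 [] rfl (le_refl 0)
    (by simp only [List.drop_zero]; intro r hr
        exact remB_nonneg x _ hx r (hrsB ▸ hr))
  simpa using h
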